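-- pv_equiv track=rewrite | github.com/alifsepta/learnData | leetcode-solved/2373_Largest Local Values in a Matrix/2373-Largest_Local_Values_in_a_Matrix.py | generate_max_local
-- ===== SOURCE A (Python) =====
-- def generate_max_local(grid):
--     n = len(grid)
--     max_local = []
--
--     # Iterate through the rows (except the first and last 2 rows)
--     for i in range(1, n - 1):
--         row_max = []
--         # Iterate through the columns (except the first and last 2 columns)
--         for j in range(1, n - 1):
--             # Find the maximum value in the 3x3 submatrix centered at grid[i][j]
--             max_value = max(
--                 grid[i - 1][j - 1], grid[i - 1][j], grid[i - 1][j + 1],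
--                 grid[i][j - 1],     grid[i][j],     grid[i][j + 1],
--                 grid[i + 1][j - 1], grid[i + 1][j], grid[i + 1][j + 1]
--             )
--             row_max.append(max_value)
--         max_local.append(row_max)
--
--     return max_local
-- ===== SOURCE B (Python) =====
-- def generate_max_local(grid):
--     n = len(grid)
--     if n < 3:
--         return []
--     # horizontal pass: max of each row over a 3-wide window
--     H = [[max(row[j - 1], row[j], row[j + 1]) for j in range(1, n - 1)] for row in grid]
--     # vertical pass over the precomputed table
--     return [[max(a, b, c) for a, b, c in zip(H[i - 1], H[i], H[i + 1])] for i in range(1, n - 1)]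
-- ===== Notes on version B (the rewrite author's own statement) =====
-- stated objective: alternative
-- what changed: Replaces the per-cell 9-way max over a 3x3 block by a separable two-pass reduction: a horizontal 3-window row-max table H built first, then a vertical 3-row elementwise max over H via zip.
import Mathlib
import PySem

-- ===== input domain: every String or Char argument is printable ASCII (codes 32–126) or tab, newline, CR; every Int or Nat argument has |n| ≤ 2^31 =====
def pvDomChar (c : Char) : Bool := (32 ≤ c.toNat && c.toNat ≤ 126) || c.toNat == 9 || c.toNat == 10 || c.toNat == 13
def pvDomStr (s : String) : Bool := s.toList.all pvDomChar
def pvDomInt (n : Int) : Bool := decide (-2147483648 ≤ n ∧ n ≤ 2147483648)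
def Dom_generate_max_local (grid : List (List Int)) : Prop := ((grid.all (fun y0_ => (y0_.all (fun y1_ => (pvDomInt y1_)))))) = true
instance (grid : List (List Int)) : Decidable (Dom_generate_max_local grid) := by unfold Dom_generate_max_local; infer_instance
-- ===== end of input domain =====

-- B replaces the single 9-way max per cell by a separable two-pass reduction:
-- a horizontal 3-window row-max table H, then a vertical 3-row max over H (alternative decomposition).

-- ===== PORT A =====
def generate_max_local (grid : List (List Int)) : List (List Int) :=
  let n : Int := grid.length
  (PySem.List.pyRange 1 (n - 1) 1).foldl (fun max_local i =>
    let row_max := (PySem.List.pyRange 1 (n - 1) 1).foldl (fun row_max j =>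
      row_max ++ [max (max (max (max (max (max (max (max
        (PySem.List.pyGetD (PySem.List.pyGetD grid (i - 1) []) (j - 1) 0)
        (PySem.List.pyGetD (PySem.List.pyGetD grid (i - 1) []) j 0))
        (PySem.List.pyGetD (PySem.List.pyGetD grid (i - 1) []) (j + 1) 0))
        (PySem.List.pyGetD (PySem.List.pyGetD grid i []) (j - 1) 0))
        (PySem.List.pyGetD (PySem.List.pyGetD grid i []) j 0))
        (PySem.List.pyGetD (PySem.List.pyGetD grid i []) (j + 1) 0))
        (PySem.List.pyGetD (PySem.List.pyGetD grid (i + 1) []) (j - 1) 0))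
        (PySem.List.pyGetD (PySem.List.pyGetD grid (i + 1) []) j 0))
        (PySem.List.pyGetD (PySem.List.pyGetD grid (i + 1) []) (j + 1) 0)]) []
    max_local ++ [row_max]) []

-- ===== PORT B =====
def generate_max_local_alt (grid : List (List Int)) : List (List Int) :=
  let n : Int := grid.length
  if n < 3 then []
  else
    let H := grid.map (fun row => (PySem.List.pyRange 1 (n - 1) 1).map (fun j =>
      max (max (PySem.List.pyGetD row (j - 1) 0) (PySem.List.pyGetD row j 0))
        (PySem.List.pyGetD row (j + 1) 0)))
    (PySem.List.pyRange 1 (n - 1) 1).map (fun i =>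
      ((PySem.List.pyGetD H (i - 1) []).zip
        ((PySem.List.pyGetD H i []).zip (PySem.List.pyGetD H (i + 1) []))).map
        (fun p => max (max p.1 p.2.1) p.2.2))

-- ===== PRECONDITION & SPEC =====
-- Pre_ excludes exactly the inputs on which the Python A raises IndexError:
-- grids with at least 3 rows where some row is shorter than the number of rows.
def Pre_generate_max_local (grid : List (List Int)) : Prop :=
  grid.length < 3 ∨ ∀ row ∈ grid, grid.length ≤ row.length
instance (grid : List (List Int)) : Decidable (Pre_generate_max_local grid) := by
  unfold Pre_generate_max_local; infer_instance
def pvWitness_generate_max_local : List (List Int) := [[1, 2, 3], [4, 5, 6], [7, 8, 9]]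
def Spec_generate_max_local (grid : List (List Int)) (out : List (List Int)) : Prop := out = generate_max_local_alt grid
instance (grid : List (List Int)) (out : List (List Int)) : Decidable (Spec_generate_max_local grid out) := by unfold Spec_generate_max_local; infer_instance

-- ===== CLAIM (what is proved, stated in full; the proofs are below) =====
def Claim_equal_generate_max_local : Prop := ∀ (grid : List (List Int)), Dom_generate_max_local grid → Pre_generate_max_local grid → Spec_generate_max_local grid (generate_max_local grid)

-- ===== LEMMAS AND PROOFS =====

theorem generate_max_local_eq_alt (grid : List (List Int)) :
    generate_max_local grid = generate_max_local_alt grid := by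
  unfold generate_max_local generate_max_local_alt
  by_cases h : (grid.length : Int) < 3
  · simp only [h, if_pos]
    rw [PySem.List.pyRange_one_eq_nil (by omega)]
    simp
  · simp only [h, if_false]
    rw [PySem.List.foldl_append_singleton_eq_map]
    simp only [PySem.List.foldl_append_singleton_eq_map, List.nil_append]
    apply List.map_congr_left
    intro i hi
    rw [PySem.List.mem_pyRange_one] at hi
    rw [PySem.List.pyGetD_eq_getElem _ _ (by omega) (by omega : i - 1 < _),
        PySem.List.pyGetD_eq_getElem _ _ (by omega) (by omega : i < _),
        PySem.List.pyGetD_eq_getElem _ _ (by omega) (by omega : i + 1 < _)]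
    rw [PySem.List.pyGetD_eq_getElem _ _ (by omega) (by simp; omega : i - 1 < _),
        PySem.List.pyGetD_eq_getElem _ _ (by omega) (by simp; omega : i < _),
        PySem.List.pyGetD_eq_getElem _ _ (by omega) (by simp; omega : i + 1 < _)]
    simp only [List.getElem_map, List.zip_map', List.map_map]
    apply List.map_congr_left
    intro j _
    simp only [Function.comp]
    ac_rfl

-- ===== VERDICT (by name: the statement is the Claim_ definition above) =====
theorem generate_max_local_spec : Claim_equal_generate_max_local := by
  intro grid _ _
  unfold Spec_generate_max_local
  exact generate_max_local_eq_alt grid
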